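-- pv_equiv track=rewrite | github.com/GwanJinHan/Algorithm | boj/Gold/14502.py | solve
-- ===== SOURCE A (Python) =====
-- from itertools import combinations
-- from collections import deque
-- import copy
--
-- def spread_virus(temp_lab, virus_positions, n, m):
--     dx, dy = [0, 1, 0, -1], [1, 0, -1, 0]
--     queue = deque(virus_positions)
--
--     while queue:
--         x, y = queue.popleft()
--
--         for i in range(4):
--             nx, ny = x + dx[i], y + dy[i]
--
--             if 0 <= nx < n and 0 <= ny < m and temp_lab[nx][ny] == 0:
--                 temp_lab[nx][ny] = 2
--                 queue.append((nx, ny))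
--
-- def get_safe_area(lab, n, m):
--     safe_area = 0
--     for i in range(n):
--         for j in range(m):
--             if lab[i][j] == 0:
--                 safe_area += 1
--     return safe_area
--
-- def solve(n, m, lab):
--     empty_spaces = []
--     virus_positions = []
--
--     for i in range(n):
--         for j in range(m):
--             if lab[i][j] == 0:
--                 empty_spaces.append((i, j))
--             elif lab[i][j] == 2:
--                 virus_positions.append((i, j))
--
--     wall_combinations = list(combinations(empty_spaces, 3))
--     max_safe_area = 0
--
--     for walls in wall_combinations:
--         temp_lab = copy.deepcopy(lab)
--
--         for wall in walls:
--             temp_lab[wall[0]][wall[1]] = 1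
--
--         spread_virus(temp_lab, virus_positions, n, m)
--         safe_area = get_safe_area(temp_lab, n, m)
--
--         max_safe_area = max(max_safe_area, safe_area)
--
--     return max_safe_area
-- ===== SOURCE B (Python) =====
-- from itertools import combinations
--
--
-- def _dfs(grid, n, m, x, y):
--     # recursive flood fill: mark this cell infected and spread to its neighbours
--     if 0 <= x < n and 0 <= y < m and grid[x][y] == 0:
--         grid[x][y] = 2
--         for dx, dy in ((0, 1), (1, 0), (0, -1), (-1, 0)):
--             _dfs(grid, n, m, x + dx, y + dy)
--
--
-- def solve(n, m, lab):
--     cells = [(i, j) for i in range(n) for j in range(m)]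
--     empties = [c for c in cells if lab[c[0]][c[1]] == 0]
--     viruses = [c for c in cells if lab[c[0]][c[1]] == 2]
--     best = 0
--     for walls in combinations(empties, 3):
--         grid = [row[:] for row in lab]
--         for x, y in walls:
--             grid[x][y] = 1
--         for vx, vy in viruses:
--             for dx, dy in ((0, 1), (1, 0), (0, -1), (-1, 0)):
--                 _dfs(grid, n, m, vx + dx, vy + dy)
--         safe = sum(1 for i, j in cells if grid[i][j] == 0)
--         if safe > best:
--             best = safe
--     return best
-- ===== Notes on version B (the rewrite author's own statement) =====
-- stated objective: alternative
-- what changed: The virus spread is re-implemented as a recursive DFS flood fill on a set-seeded helper instead of A's BFS deque, the empty/virus cells and the safe-area count are computed by comprehensions over a precomputed cell list instead of nested append loops and a rescan helper; equivalence rests on flood-fill reachability being traversal-order independent.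
import Mathlib
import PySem

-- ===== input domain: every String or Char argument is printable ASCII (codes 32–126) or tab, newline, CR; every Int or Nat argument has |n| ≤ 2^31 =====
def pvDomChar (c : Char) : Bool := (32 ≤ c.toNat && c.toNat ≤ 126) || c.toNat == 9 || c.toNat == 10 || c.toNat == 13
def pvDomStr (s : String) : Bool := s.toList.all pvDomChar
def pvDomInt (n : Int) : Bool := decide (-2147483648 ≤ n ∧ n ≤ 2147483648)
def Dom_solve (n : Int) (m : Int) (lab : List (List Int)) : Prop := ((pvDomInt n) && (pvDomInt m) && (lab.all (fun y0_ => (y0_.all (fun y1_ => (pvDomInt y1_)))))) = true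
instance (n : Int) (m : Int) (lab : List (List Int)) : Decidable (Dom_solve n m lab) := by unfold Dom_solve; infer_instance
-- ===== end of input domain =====

-- B replaces A's BFS-deque virus spread by a recursive DFS flood fill and computes the
-- cell lists and the safe-area count by filters over one precomputed cell list (objective:
-- alternative decomposition, same asymptotic cost).

-- ===== PORT A =====

-- shared low-level grid primitives (used by both ports, like Python's indexing)
def dirs : List (Int × Int) := [(0, 1), (1, 0), (0, -1), (-1, 0)]

def cell (g : List (List Int)) (x y : Int) : Int := (g.getD x.toNat []).getD y.toNat 0

def upd (g : List (List Int)) (x y v : Int) : List (List Int) :=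
  g.set x.toNat ((g.getD x.toNat []).set y.toNat v)

-- row-major list of all in-range coordinates (B's `cells`; also the index set of A's scans)
def cellsL (n m : Int) : List (Int × Int) :=
  (PySem.List.pyRange 0 n 1).flatMap (fun i => (PySem.List.pyRange 0 m 1).map (fun j => (i, j)))

-- number of 0-cells at in-range coordinates (used only as recursion fuel by the ports)
def zcount (n m : Int) (g : List (List Int)) : Nat :=
  (cellsL n m).countP (fun c => cell g c.1 c.2 == 0)

-- itertools.combinations in lexicographic order
def combos {α : Type} : Nat → List α → List (List α)
  | 0, _ => [[]]
  | _ + 1, [] => []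
  | k + 1, x :: xs => (combos k xs).map (fun t => x :: t) ++ combos (k + 1) xs

-- A: collect empty spaces and virus positions by nested append loops
def scanA (n m : Int) (lab : List (List Int)) : List (Int × Int) × List (Int × Int) :=
  (PySem.List.pyRange 0 n 1).foldl (fun p i =>
    (PySem.List.pyRange 0 m 1).foldl (fun p j =>
      if cell lab i j = 0 then (p.1 ++ [(i, j)], p.2)
      else if cell lab i j = 2 then (p.1, p.2 ++ [(i, j)]) else p) p) ([], [])

-- A: one BFS step — process the four neighbours of the popped cell
def bstep (n m : Int) (xy : Int × Int) (s : List (List Int) × List (Int × Int))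
    (d : Int × Int) : List (List Int) × List (Int × Int) :=
  let nx := xy.1 + d.1
  let ny := xy.2 + d.2
  if 0 ≤ nx ∧ nx < n ∧ 0 ≤ ny ∧ ny < m ∧ cell s.1 nx ny = 0 then
    (upd s.1 nx ny 2, s.2 ++ [(nx, ny)])
  else s

-- A: spread_virus — BFS with a FIFO queue (fuel is only a termination guard)
def spreadA : Nat → Int → Int → List (List Int) → List (Int × Int) → List (List Int)
  | 0, _, _, g, _ => g
  | _ + 1, _, _, g, [] => g
  | f + 1, n, m, g, xy :: rest =>
      let r := dirs.foldl (bstep n m xy) (g, rest)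
      spreadA f n m r.1 r.2

-- A: get_safe_area — rescan the grid counting zeros
def safeAreaA (g : List (List Int)) (n m : Int) : Int :=
  (PySem.List.pyRange 0 n 1).foldl (fun acc i =>
    (PySem.List.pyRange 0 m 1).foldl (fun acc j =>
      if cell g i j = 0 then acc + 1 else acc) acc) 0

def solve (n : Int) (m : Int) (lab : List (List Int)) : Int :=
  let p := scanA n m lab
  (combos 3 p.1).foldl (fun best walls =>
    let t := walls.foldl (fun g w => upd g w.1 w.2 1) lab
    let t2 := spreadA (p.2.length + zcount n m t) n m t p.2
    max best (safeAreaA t2 n m)) 0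

-- ===== PORT B =====

-- B: _dfs — recursive flood fill (fuel is only a termination guard)
def dfsB : Nat → Int → Int → List (List Int) → Int → Int → List (List Int)
  | 0, _, _, g, _, _ => g
  | f + 1, n, m, g, x, y =>
      if 0 ≤ x ∧ x < n ∧ 0 ≤ y ∧ y < m ∧ cell g x y = 0 then
        dirs.foldl (fun gg d => dfsB f n m gg (x + d.1) (y + d.2)) (upd g x y 2)
      else g

def solve_alt (n : Int) (m : Int) (lab : List (List Int)) : Int :=
  let cs := cellsL n m
  let empties := cs.filter (fun c => cell lab c.1 c.2 == 0)
  let viruses := cs.filter (fun c => cell lab c.1 c.2 == 2)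
  (combos 3 empties).foldl (fun best walls =>
    let grid := lab.map (fun row => row)
    let g1 := walls.foldl (fun g w => upd g w.1 w.2 1) grid
    let g2 := viruses.foldl (fun g v =>
      dirs.foldl (fun gg d => dfsB (zcount n m gg + 1) n m gg (v.1 + d.1) (v.2 + d.2)) g) g1
    let safe : Int := ((cs.filter (fun c => cell g2 c.1 c.2 == 0)).length : Int)
    if best < safe then safe else best) 0

-- ===== PRECONDITION & SPEC =====
-- Pre_ excludes exactly the inputs on which A raises IndexError: positive n, m with fewer
-- than n rows or a row among the first n shorter than m.
def Pre_solve (n : Int) (m : Int) (lab : List (List Int)) : Prop :=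
  0 < n → 0 < m → (n ≤ (lab.length : Int) ∧ ∀ row ∈ lab.take n.toNat, m ≤ (row.length : Int))
instance (n : Int) (m : Int) (lab : List (List Int)) : Decidable (Pre_solve n m lab) := by
  unfold Pre_solve; infer_instance

def pvWitness_solve : Int × Int × List (List Int) := (2, 2, [[2, 0], [0, 0]])

def Spec_solve (n : Int) (m : Int) (lab : List (List Int)) (out : Int) : Prop := out = solve_alt n m lab
instance (n : Int) (m : Int) (lab : List (List Int)) (out : Int) : Decidable (Spec_solve n m lab out) := by unfold Spec_solve; infer_instance

-- ===== CLAIM (what is proved, stated in full; the proofs are below) =====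
def Claim_equal_solve : Prop := ∀ (n : Int) (m : Int) (lab : List (List Int)), Dom_solve n m lab → Pre_solve n m lab → Spec_solve n m lab (solve n m lab)

-- ===== LEMMAS AND PROOFS =====

-- membership in the cell list is exactly in-rangeness
theorem mem_cellsL {n m : Int} {c : Int × Int} :
    c ∈ cellsL n m ↔ 0 ≤ c.1 ∧ c.1 < n ∧ 0 ≤ c.2 ∧ c.2 < m := by
  obtain ⟨i, j⟩ := c
  simp [cellsL, List.mem_flatMap, PySem.List.mem_pyRange_one, Prod.ext_iff]
  tauto

theorem nodup_cellsL (n m : Int) : (cellsL n m).Nodup := by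
  have h : cellsL n m = (PySem.List.pyRange 0 n 1) ×ˢ (PySem.List.pyRange 0 m 1) := rfl
  rw [h]
  exact List.Nodup.product (PySem.List.nodup_pyRange_one _ _) (PySem.List.nodup_pyRange_one _ _)

-- a grid that really has n rows of length ≥ m (in its first n rows)
def Shaped (n m : Int) (g : List (List Int)) : Prop :=
  n ≤ (g.length : Int) ∧ ∀ i : Nat, (i : Int) < n → m ≤ ((g.getD i []).length : Int)

theorem shaped_idx {n m : Int} {g : List (List Int)} (h : Shaped n m g) {x y : Int}
    (hx0 : 0 ≤ x) (hxn : x < n) (hy0 : 0 ≤ y) (hym : y < m) :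
    x.toNat < g.length ∧ y.toNat < (g.getD x.toNat []).length := by
  obtain ⟨h1, h2⟩ := h
  have hx' : x.toNat < g.length := by omega
  have := h2 x.toNat (by omega)
  exact ⟨hx', by omega⟩

theorem getD_set_list {α : Type} (l : List α) (k i : Nat) (v d : α) :
    (l.set k v).getD i d = if i = k ∧ k < l.length then v else l.getD i d := by
  rcases Nat.lt_or_ge k l.length with hk | hk
  · by_cases hik : i = k
    · subst hik; simp [List.getD_eq_getElem?_getD, hk]
    · simp [List.getD_eq_getElem?_getD, List.getElem?_set_ne (Ne.symm hik), hik]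
  · rw [List.set_eq_of_length_le hk]
    simp [Nat.not_lt_of_ge hk]

theorem cell_upd {g : List (List Int)} {x y : Int} (v : Int) {a b : Int}
    (hx0 : 0 ≤ x) (hy0 : 0 ≤ y) (ha0 : 0 ≤ a) (hb0 : 0 ≤ b)
    (hx : x.toNat < g.length) (hy : y.toNat < (g.getD x.toNat []).length) :
    cell (upd g x y v) a b = if a = x ∧ b = y then v else cell g a b := by
  unfold cell upd
  rw [getD_set_list]
  by_cases hax : a = x
  · subst hax
    rw [if_pos ⟨rfl, hx⟩, getD_set_list]
    by_cases hby : b = y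
    · subst hby; rw [if_pos ⟨rfl, hy⟩, if_pos ⟨rfl, rfl⟩]
    · rw [if_neg (fun hh => hby (by omega : b = y)), if_neg (fun hh => hby hh.2)]
  · have hne : a.toNat ≠ x.toNat := by omega
    rw [if_neg (fun hh => hne hh.1), if_neg (fun hh => hax hh.1)]

theorem shaped_upd {n m : Int} {g : List (List Int)} (h : Shaped n m g) (x y v : Int) :
    Shaped n m (upd g x y v) := by
  obtain ⟨h1, h2⟩ := h
  refine ⟨by simpa [upd] using h1, fun i hi => ?_⟩
  unfold upd
  rw [getD_set_list]
  split
  · next hc => obtain ⟨he, hlt⟩ := hc; subst he; simpa [List.length_set] using h2 _ hi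
  · exact h2 i hi

-- generic counting lemmas
theorem countP_update {α : Type} [DecidableEq α] {l : List α} (hl : l.Nodup) {p q : α → Bool} {c : α}
    (hc : c ∈ l) (hpc : p c = true) (hqc : q c = false)
    (h : ∀ a ∈ l, a ≠ c → q a = p a) : l.countP q + 1 = l.countP p := by
  induction l with
  | nil => simp at hc
  | cons a t ih =>
    simp only [List.nodup_cons] at hl
    rcases List.mem_cons.1 hc with rfl | hct
    · have hqt : ∀ b ∈ t, q b = p b := fun b hb => h b (List.mem_cons_of_mem _ hb) (fun e => hl.1 (e ▸ hb))
      have heq : t.countP q = t.countP p := List.countP_congr (fun b hb => by rw [hqt b hb])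
      simp [List.countP_cons, hpc, hqc, heq]
    · have hac : a ≠ c := fun e => hl.1 (e ▸ hct)
      have := ih hl.2 hct (fun b hb hbc => h b (List.mem_cons_of_mem _ hb) hbc)
      have ha := h a (List.mem_cons_self) hac
      simp [List.countP_cons, ha]
      omega

-- reachability through 0-cells from the 2-cells of the walled grid W
inductive ReachV (n m : Int) (W : List (List Int)) : Int × Int → Prop
  | seed (c : Int × Int) : c ∈ cellsL n m → cell W c.1 c.2 = 2 → ReachV n m W c
  | step (c d : Int × Int) : ReachV n m W c → d ∈ dirs →
      (c.1 + d.1, c.2 + d.2) ∈ cellsL n m → cell W (c.1 + d.1) (c.2 + d.2) = 0 →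
      ReachV n m W (c.1 + d.1, c.2 + d.2)

-- state invariants shared by both flood fills: g is W overlaid with the marked set S
def InvO (n m : Int) (W g : List (List Int)) (S : Int × Int → Bool) : Prop :=
  ∀ c ∈ cellsL n m, cell g c.1 c.2 = if S c then 2 else cell W c.1 c.2

def SOK (n m : Int) (W : List (List Int)) (S : Int × Int → Bool) : Prop :=
  ∀ c : Int × Int, S c = true → c ∈ cellsL n m ∧ cell W c.1 c.2 = 0 ∧ ReachV n m W c

-- every marked cell not exempted by F has no 0-valued in-range neighbour
def ClosedE (n m : Int) (g : List (List Int)) (F : Int × Int → Bool) : Prop :=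
  ∀ c ∈ cellsL n m, cell g c.1 c.2 = 2 → F c = false → ∀ d ∈ dirs,
    (c.1 + d.1, c.2 + d.2) ∈ cellsL n m → cell g (c.1 + d.1) (c.2 + d.2) ≠ 0

theorem reach_mem {n m : Int} {W : List (List Int)} {c : Int × Int}
    (h : ReachV n m W c) : c ∈ cellsL n m := by
  cases h with
  | seed c hc _ => exact hc
  | step c d _ _ hm _ => exact hm

-- final characterisation: a closed overlay is exactly the reachability closure
theorem final_char {n m : Int} {W g : List (List Int)} {S F : Int × Int → Bool}
    (hI : InvO n m W g S) (hS : SOK n m W S) (hC : ClosedE n m g F)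
    (hF : ∀ c ∈ cellsL n m, F c = true → cell g c.1 c.2 = 2 → ∀ d ∈ dirs,
      (c.1 + d.1, c.2 + d.2) ∈ cellsL n m → cell W (c.1 + d.1) (c.2 + d.2) = 0 →
      S (c.1 + d.1, c.2 + d.2) = true) :
    ∀ c ∈ cellsL n m,
      (ReachV n m W c → cell g c.1 c.2 = 2) ∧
      (¬ ReachV n m W c → cell g c.1 c.2 = cell W c.1 c.2) := by
  intro c hc
  constructor
  · intro hr
    clear hc
    induction hr with
    | seed c hc h2 =>
      rw [hI c hc]
      split
      · rfl
      · exact h2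
    | step c d hr hd hm h0 ih =>
      have hcm : c ∈ cellsL n m := reach_mem hr
      have hSnb : S (c.1 + d.1, c.2 + d.2) = true := by
        cases hFc : F c with
        | true => exact hF c hcm hFc ih d hd hm h0
        | false =>
          have hnz := hC c hcm ih hFc d hd hm
          have hInb := hI _ hm
          cases hSnb : S (c.1 + d.1, c.2 + d.2) with
          | true => rfl
          | false =>
            rw [hSnb] at hInb
            simp only [Bool.false_eq_true, if_false] at hInb
            exact absurd (hInb.trans h0) hnz
      have hInb := hI _ hm
      rw [hInb, hSnb]
      simp
  · intro hnr
    cases hSc : S c with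
    | true => exact absurd (hS c hSc).2.2 hnr
    | false => rw [hI c hc, hSc]; simp

-- ---- BFS (port A) computes the closure ----

def qOK (n m : Int) (W g : List (List Int)) (q : List (Int × Int)) : Prop :=
  ∀ c ∈ q, c ∈ cellsL n m ∧ cell g c.1 c.2 = 2 ∧ ReachV n m W c

-- closed except the queue and the still unprocessed directions ds of the popped cell xy
def ClosedQx (n m : Int) (g : List (List Int)) (q : List (Int × Int)) (xy : Int × Int)
    (ds : List (Int × Int)) : Prop :=
  ∀ c ∈ cellsL n m, cell g c.1 c.2 = 2 → c ∉ q → ∀ d ∈ dirs, (c = xy → d ∉ ds) →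
    (c.1 + d.1, c.2 + d.2) ∈ cellsL n m → cell g (c.1 + d.1) (c.2 + d.2) ≠ 0

theorem bfs_main (n m : Int) (W : List (List Int)) (hW : Shaped n m W) :
    ∀ (fuel : Nat) (g : List (List Int)) (q : List (Int × Int)) (S : Int × Int → Bool),
      Shaped n m g → InvO n m W g S → SOK n m W S → qOK n m W g q →
      ClosedQx n m g q (0, 0) [] → q.length + zcount n m g ≤ fuel →
      ∀ c ∈ cellsL n m,
        (ReachV n m W c → cell (spreadA fuel n m g q) c.1 c.2 = 2) ∧
        (¬ ReachV n m W c → cell (spreadA fuel n m g q) c.1 c.2 = cell W c.1 c.2) := by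
  intro fuel
  induction fuel with
  | zero =>
    intro g q S hSh hI hS hq hC hz
    have hqnil : q = [] := by
      cases q with
      | nil => rfl
      | cons a t => simp at hz
    subst hqnil
    exact final_char (F := fun _ => false) hI hS
      (fun c hc h2 _ d hd hm' => hC c hc h2 (List.not_mem_nil) d hd (fun _ => List.not_mem_nil) hm')
      (fun c _ hFc => by simp at hFc)
  | succ f IH =>
    intro g q S hSh hI hS hq hC hz
    cases q with
    | nil =>
      exact final_char (F := fun _ => false) hI hS
        (fun c hc h2 _ d hd hm' => hC c hc h2 (List.not_mem_nil) d hd (fun _ => List.not_mem_nil) hm')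
        (fun c _ hFc => by simp at hFc)
    | cons xy rest =>
      obtain ⟨hxyC, hxy2, hxyR⟩ := hq xy List.mem_cons_self
      have hqrest : qOK n m W g rest := fun c hc => hq c (List.mem_cons_of_mem _ hc)
      have hCrest : ClosedQx n m g rest xy dirs := by
        intro c hc h2 hnotin d' hd' hcl hm'
        by_cases hcx : c = xy
        · exact absurd hd' (hcl hcx)
        · exact hC c hc h2 (by simp [hcx, hnotin]) d' hd' (fun _ => List.not_mem_nil) hm'
      have fold : ∀ ds : List (Int × Int), (∀ d ∈ ds, d ∈ dirs) →
          ∀ (g' : List (List Int)) (q' : List (Int × Int)) (S' : Int × Int → Bool),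
          Shaped n m g' → InvO n m W g' S' → SOK n m W S' → qOK n m W g' q' →
          cell g' xy.1 xy.2 = 2 → ClosedQx n m g' q' xy ds →
          ∃ S'' : Int × Int → Bool,
            (let r := ds.foldl (bstep n m xy) (g', q')
             Shaped n m r.1 ∧ InvO n m W r.1 S'' ∧ SOK n m W S'' ∧ qOK n m W r.1 r.2 ∧
             ClosedQx n m r.1 r.2 xy [] ∧
             r.2.length + zcount n m r.1 = q'.length + zcount n m g') := by
        intro ds
        induction ds with
        | nil =>
          intro _ g' q' S' h1 h2 h3 h4 _ h6
          exact ⟨S', h1, h2, h3, h4, h6, rfl⟩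
        | cons d ds ihd =>
          intro hds g' q' S' h1 h2 h3 h4 hxy2' h6
          have hd : d ∈ dirs := hds d List.mem_cons_self
          simp only [List.foldl_cons]
          by_cases hgd : 0 ≤ xy.1 + d.1 ∧ xy.1 + d.1 < n ∧ 0 ≤ xy.2 + d.2 ∧ xy.2 + d.2 < m ∧
              cell g' (xy.1 + d.1) (xy.2 + d.2) = 0
          · -- the neighbour is an open cell: mark it and append it to the queue
            obtain ⟨hb1, hb2, hb3, hb4, hcell⟩ := hgd
            have hmemnb : (xy.1 + d.1, xy.2 + d.2) ∈ cellsL n m := mem_cellsL.mpr ⟨hb1, hb2, hb3, hb4⟩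
            have hidx := shaped_idx h1 hb1 hb2 hb3 hb4
            have hInb := h2 _ hmemnb
            have hWS : S' (xy.1 + d.1, xy.2 + d.2) = false ∧ cell W (xy.1 + d.1) (xy.2 + d.2) = 0 := by
              cases hSnb : S' (xy.1 + d.1, xy.2 + d.2) with
              | true => rw [hSnb] at hInb; simp at hInb; omega
              | false => rw [hSnb] at hInb; simp at hInb; exact ⟨rfl, hInb ▸ hcell⟩
            have hRnb : ReachV n m W (xy.1 + d.1, xy.2 + d.2) := ReachV.step xy d hxyR hd hmemnb hWS.2
            have hIc : ∀ c ∈ cellsL n m,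
                cell (upd g' (xy.1 + d.1) (xy.2 + d.2) 2) c.1 c.2 =
                  if c = (xy.1 + d.1, xy.2 + d.2) then 2 else cell g' c.1 c.2 := by
              intro c hc
              obtain ⟨hc1, hc2, hc3, hc4⟩ := mem_cellsL.mp hc
              rw [cell_upd 2 hb1 hb3 hc1 hc3 hidx.1 hidx.2]
              by_cases hcx : c = (xy.1 + d.1, xy.2 + d.2)
              · rw [if_pos ⟨by rw [hcx], by rw [hcx]⟩, if_pos hcx]
              · rw [if_neg (fun hh => hcx (Prod.ext hh.1 hh.2)), if_neg hcx]
            have hbs : bstep n m xy (g', q') d =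
                (upd g' (xy.1 + d.1) (xy.2 + d.2) 2, q' ++ [(xy.1 + d.1, xy.2 + d.2)]) := by
              unfold bstep
              rw [if_pos ⟨hb1, hb2, hb3, hb4, hcell⟩]
            rw [hbs]
            have hSh2 : Shaped n m (upd g' (xy.1 + d.1) (xy.2 + d.2) 2) := shaped_upd h1 _ _ _
            have hI2 : InvO n m W (upd g' (xy.1 + d.1) (xy.2 + d.2) 2)
                (fun c => S' c || decide (c = (xy.1 + d.1, xy.2 + d.2))) := by
              intro c hc
              rw [hIc c hc]
              by_cases hcx : c = (xy.1 + d.1, xy.2 + d.2)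
              · simp [hcx]
              · simp only [hcx, decide_false, Bool.or_false, if_neg hcx]
                exact h2 c hc
            have hS2 : SOK n m W (fun c => S' c || decide (c = (xy.1 + d.1, xy.2 + d.2))) := by
              intro c hSc
              rcases Bool.or_eq_true_iff.mp hSc with h | h
              · exact h3 c h
              · have : c = (xy.1 + d.1, xy.2 + d.2) := of_decide_eq_true h
                subst this
                exact ⟨hmemnb, hWS.2, hRnb⟩
            have hq2 : qOK n m W (upd g' (xy.1 + d.1) (xy.2 + d.2) 2)
                (q' ++ [(xy.1 + d.1, xy.2 + d.2)]) := by
              intro c hc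
              rcases List.mem_append.mp hc with hc' | hc'
              · obtain ⟨hm1, hm2, hm3⟩ := h4 c hc'
                refine ⟨hm1, ?_, hm3⟩
                rw [hIc c hm1]
                split
                · rfl
                · exact hm2
              · have : c = (xy.1 + d.1, xy.2 + d.2) := by simpa using hc'
                subst this
                refine ⟨hmemnb, ?_, hRnb⟩
                rw [hIc _ hmemnb, if_pos rfl]
            have hxy2'' : cell (upd g' (xy.1 + d.1) (xy.2 + d.2) 2) xy.1 xy.2 = 2 := by
              rw [hIc xy hxyC]
              split
              · rfl
              · exact hxy2'
            have hC2 : ClosedQx n m (upd g' (xy.1 + d.1) (xy.2 + d.2) 2)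
                (q' ++ [(xy.1 + d.1, xy.2 + d.2)]) xy ds := by
              intro c hc h2c hnotin d' hd' hcl hm'
              rw [hIc c hc] at h2c
              rw [hIc _ hm']
              by_cases hcnb : c = (xy.1 + d.1, xy.2 + d.2)
              · exact absurd (List.mem_append.mpr (Or.inr (by simp [hcnb]))) hnotin
              · rw [if_neg hcnb] at h2c
                by_cases htgt : (c.1 + d'.1, c.2 + d'.2) = (xy.1 + d.1, xy.2 + d.2)
                · rw [if_pos htgt]; omega
                · rw [if_neg htgt]
                  have hnotin' : c ∉ q' := fun hcq => hnotin (List.mem_append.mpr (Or.inl hcq))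
                  refine h6 c hc h2c hnotin' d' hd' ?_ hm'
                  intro hcxy hdin
                  rcases List.mem_cons.mp hdin with rfl | hds'
                  · exact htgt (by rw [hcxy])
                  · exact hcl hcxy hds'
            have hzc : zcount n m (upd g' (xy.1 + d.1) (xy.2 + d.2) 2) + 1 = zcount n m g' := by
              apply countP_update (nodup_cellsL n m) hmemnb
              · simp [hcell]
              · have := hIc _ hmemnb
                simp only [if_pos rfl] at this
                simp [this]
              · intro a ha hac
                rw [hIc a ha, if_neg hac]
            obtain ⟨S'', hpack⟩ := ihd (fun e he => hds e (List.mem_cons_of_mem _ he))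
              (upd g' (xy.1 + d.1) (xy.2 + d.2) 2) (q' ++ [(xy.1 + d.1, xy.2 + d.2)])
              (fun c => S' c || decide (c = (xy.1 + d.1, xy.2 + d.2)))
              hSh2 hI2 hS2 hq2 hxy2'' hC2
            refine ⟨S'', hpack.1, hpack.2.1, hpack.2.2.1, hpack.2.2.2.1, hpack.2.2.2.2.1, ?_⟩
            have := hpack.2.2.2.2.2
            simp only [List.length_append, List.length_singleton] at this ⊢
            omega
          · -- blocked or out of range: the state is unchanged
            have hbs : bstep n m xy (g', q') d = (g', q') := by
              unfold bstep
              rw [if_neg hgd]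
            rw [hbs]
            have hC2 : ClosedQx n m g' q' xy ds := by
              intro c hc h2c hnotin d' hd' hcl hm'
              by_cases hcx : c = xy ∧ d' = d
              · obtain ⟨hcx1, hcx2⟩ := hcx
                subst hcx1; subst hcx2
                obtain ⟨ht1, ht2, ht3, ht4⟩ := mem_cellsL.mp hm'
                intro h0
                exact hgd ⟨ht1, ht2, ht3, ht4, h0⟩
              · refine h6 c hc h2c hnotin d' hd' ?_ hm'
                intro hcxy hdin
                rcases List.mem_cons.mp hdin with rfl | hds'
                · exact hcx ⟨hcxy, rfl⟩
                · exact hcl hcxy hds'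
            exact ihd (fun e he => hds e (List.mem_cons_of_mem _ he)) g' q' S' h1 h2 h3 h4 hxy2' hC2
      obtain ⟨S'', hpack⟩ := fold dirs (fun d h => h) g rest S hSh hI hS hqrest hxy2 hCrest
      simp only at hpack
      obtain ⟨hShr, hIr, hSr, hqr, hCr, hzr⟩ := hpack
      have hstep : spreadA (f + 1) n m g (xy :: rest) =
          spreadA f n m (dirs.foldl (bstep n m xy) (g, rest)).1
            (dirs.foldl (bstep n m xy) (g, rest)).2 := rfl
      rw [hstep]
      refine IH _ _ S'' hShr hIr hSr hqr ?_ ?_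
      · intro c hc h2c hnotin d' hd' _ hm'
        exact hCr c hc h2c hnotin d' hd' (fun _ => List.not_mem_nil) hm'
      · simp only [List.length_cons] at hz
        omega

-- ---- DFS (port B) computes the closure ----

theorem dfs_main (n m : Int) (W : List (List Int)) (hW : Shaped n m W) :
    ∀ (fuel : Nat) (x y : Int) (g : List (List Int)) (S F : Int × Int → Bool),
      Shaped n m g → InvO n m W g S → SOK n m W S → ClosedE n m g F →
      ((x, y) ∈ cellsL n m → cell W x y = 0 → ReachV n m W (x, y)) →
      zcount n m g < fuel →
      ∃ S' : Int × Int → Bool,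
        (∀ c, S c = true → S' c = true) ∧
        Shaped n m (dfsB fuel n m g x y) ∧ InvO n m W (dfsB fuel n m g x y) S' ∧
        SOK n m W S' ∧ ClosedE n m (dfsB fuel n m g x y) F ∧
        zcount n m (dfsB fuel n m g x y) ≤ zcount n m g ∧
        ((x, y) ∈ cellsL n m → cell W x y = 0 → S' (x, y) = true) := by
  intro fuel
  induction fuel with
  | zero => intro x y g S F _ _ _ _ _ hz; omega
  | succ f IH =>
    intro x y g S F hSh hI hS hC hRJ hz
    by_cases hg : 0 ≤ x ∧ x < n ∧ 0 ≤ y ∧ y < m ∧ cell g x y = 0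
    · -- the cell is open: mark it and recurse into the four neighbours
      obtain ⟨hx0, hxn, hy0, hym, hcell⟩ := hg
      have hmem : (x, y) ∈ cellsL n m := mem_cellsL.mpr ⟨hx0, hxn, hy0, hym⟩
      have hidx := shaped_idx hSh hx0 hxn hy0 hym
      have hIxy := hI _ hmem
      have hSxyF : S (x, y) = false ∧ cell W x y = 0 := by
        cases hSxy : S (x, y) with
        | true => rw [hSxy] at hIxy; simp at hIxy; omega
        | false => rw [hSxy] at hIxy; simp at hIxy; exact ⟨rfl, hIxy ▸ hcell⟩
      have hRxy : ReachV n m W (x, y) := hRJ hmem hSxyF.2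
      have hIc : ∀ c ∈ cellsL n m,
          cell (upd g x y 2) c.1 c.2 = if c = (x, y) then 2 else cell g c.1 c.2 := by
        intro c hc
        obtain ⟨hc1, hc2, hc3, hc4⟩ := mem_cellsL.mp hc
        rw [cell_upd 2 hx0 hy0 hc1 hc3 hidx.1 hidx.2]
        by_cases hcx : c = (x, y)
        · rw [if_pos ⟨by rw [hcx], by rw [hcx]⟩, if_pos hcx]
        · rw [if_neg (fun hh => hcx (Prod.ext hh.1 hh.2)), if_neg hcx]
      have hSh1 : Shaped n m (upd g x y 2) := shaped_upd hSh _ _ _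
      have hI1 : InvO n m W (upd g x y 2) (fun c => S c || decide (c = (x, y))) := by
        intro c hc
        rw [hIc c hc]
        by_cases hcx : c = (x, y)
        · simp [hcx]
        · simp only [hcx, decide_false, Bool.or_false, if_neg hcx]
          exact hI c hc
      have hS1 : SOK n m W (fun c => S c || decide (c = (x, y))) := by
        intro c hSc
        rcases Bool.or_eq_true_iff.mp hSc with h | h
        · exact hS c h
        · have : c = (x, y) := of_decide_eq_true h
          subst this
          exact ⟨hmem, hSxyF.2, hRxy⟩
      have hC1 : ClosedE n m (upd g x y 2) (fun c => F c || decide (c = (x, y))) := by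
        intro c hc h2 hF1 d hd hm'
        have hFparts := Bool.or_eq_false_iff.mp hF1
        have hcx : c ≠ (x, y) := fun e => by simp [e] at hFparts
        rw [hIc c hc] at h2
        rw [if_neg hcx] at h2
        rw [hIc _ hm']
        by_cases hnx : (c.1 + d.1, c.2 + d.2) = (x, y)
        · rw [if_pos hnx]; omega
        · rw [if_neg hnx]
          exact hC c hc h2 hFparts.1 d hd hm'
      have hzc : zcount n m (upd g x y 2) + 1 = zcount n m g := by
        apply countP_update (nodup_cellsL n m) hmem
        · simp [hcell]
        · have := hIc _ hmem
          simp only [if_pos rfl] at this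
          simp [this]
        · intro a ha hac
          rw [hIc a ha, if_neg hac]
      have hzf : zcount n m (upd g x y 2) < f := by omega
      -- the fold over the four directions
      have fold : ∀ ds : List (Int × Int), (∀ d ∈ ds, d ∈ dirs) →
          ∀ (g' : List (List Int)) (S' : Int × Int → Bool),
          Shaped n m g' → InvO n m W g' S' → SOK n m W S' → ClosedE n m g' (fun c => F c || decide (c = (x, y))) →
          S' (x, y) = true → zcount n m g' < f →
          ∃ S'' : Int × Int → Bool,
            (∀ c, S' c = true → S'' c = true) ∧
            (let r := ds.foldl (fun gg d => dfsB f n m gg (x + d.1) (y + d.2)) g'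
             Shaped n m r ∧ InvO n m W r S'' ∧ SOK n m W S'' ∧
             ClosedE n m r (fun c => F c || decide (c = (x, y))) ∧
             S'' (x, y) = true ∧ zcount n m r ≤ zcount n m g' ∧
             ∀ d ∈ ds, (x + d.1, y + d.2) ∈ cellsL n m → cell W (x + d.1) (y + d.2) = 0 →
               S'' (x + d.1, y + d.2) = true) := by
        intro ds
        induction ds with
        | nil =>
          intro _ g' S' h1 h2 h3 h4 h5 h6
          exact ⟨S', fun c h => h, h1, h2, h3, h4, h5, le_refl _, by simp⟩
        | cons d ds ihd =>
          intro hds g' S' h1 h2 h3 h4 h5 h6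
          have hd : d ∈ dirs := hds d List.mem_cons_self
          have hRJ' : (x + d.1, y + d.2) ∈ cellsL n m → cell W (x + d.1) (y + d.2) = 0 →
              ReachV n m W (x + d.1, y + d.2) := by
            intro hm' hW0
            exact ReachV.step (x, y) d ((h3 _ h5).2.2) hd hm' hW0
          obtain ⟨S2, hm2, hSh2, hI2, hS2, hC2, hz2, hclause⟩ :=
            IH (x + d.1) (y + d.2) g' S' (fun c => F c || decide (c = (x, y))) h1 h2 h3 h4 hRJ' h6
          obtain ⟨S3, hm3, hrest⟩ :=
            ihd (fun e he => hds e (List.mem_cons_of_mem _ he))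
              (dfsB f n m g' (x + d.1) (y + d.2)) S2 hSh2 hI2 hS2 hC2 (hm2 _ h5) (by omega)
          simp only [List.foldl_cons]
          refine ⟨S3, fun c hc => hm3 c (hm2 c hc), hrest.1, hrest.2.1, hrest.2.2.1,
            hrest.2.2.2.1, hrest.2.2.2.2.1, by omega, ?_⟩
          · intro e he hm' hW0
            rcases List.mem_cons.mp he with rfl | he'
            · exact hm3 _ (hclause hm' hW0)
            · exact hrest.2.2.2.2.2.2 e he' hm' hW0
      have := fold dirs (fun d h => h) (upd g x y 2) (fun c => S c || decide (c = (x, y)))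
        hSh1 hI1 hS1 hC1 (by simp) hzf
      obtain ⟨S'', hmono, hpack⟩ := this
      simp only at hpack
      obtain ⟨hShr, hIr, hSr, hCrF1, hSxyr, hzr, hnb⟩ := hpack
      rw [show dfsB (f + 1) n m g x y =
          dirs.foldl (fun gg d => dfsB f n m gg (x + d.1) (y + d.2)) (upd g x y 2) from by
        rw [dfsB]; rw [if_pos ⟨hx0, hxn, hy0, hym, hcell⟩]]
      refine ⟨S'', fun c hc => hmono c (by simp [hc]), hShr, hIr, hSr, ?_, by omega, fun _ _ => hSxyr⟩
      · -- restore closedness without exempting (x, y): its neighbours are all done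
        intro c hc h2 hFc d hd hm'
        by_cases hcx : c = (x, y)
        · subst hcx
          have hInb := hIr _ hm'
          by_cases hW0 : cell W ((x, y).1 + d.1) ((x, y).2 + d.2) = 0
          · have := hnb d hd hm' hW0
            rw [hInb, this]; simp
          · cases hSnb : S'' ((x, y).1 + d.1, (x, y).2 + d.2) with
            | true => rw [hInb, hSnb]; simp
            | false => rw [hInb, hSnb]; simpa using hW0
        · have : (F c || decide (c = (x, y))) = false := by simp [hFc, hcx]
          exact hCrF1 c hc h2 this d hd hm'
    · -- nothing to do: the guard fails
      rw [show dfsB (f + 1) n m g x y = g from by rw [dfsB]; rw [if_neg hg]]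
      refine ⟨S, fun c h => h, hSh, hI, hS, hC, le_refl _, ?_⟩
      intro hmem hW0
      obtain ⟨hb1, hb2, hb3, hb4⟩ := mem_cellsL.mp hmem
      have hInb := hI _ hmem
      cases hSxy : S (x, y) with
      | true => rfl
      | false =>
        rw [hSxy] at hInb
        simp only [Bool.false_eq_true, if_false] at hInb
        exact absurd ⟨hb1, hb2, hb3, hb4, by rw [hInb]; exact hW0⟩ hg

-- ---- characterisations of the straight-line pieces ----

theorem scan_inner (lab : List (List Int)) (i : Int) :
    ∀ (K : List Int) (p : List (Int × Int) × List (Int × Int)),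
    K.foldl (fun p j =>
      if cell lab i j = 0 then (p.1 ++ [(i, j)], p.2)
      else if cell lab i j = 2 then (p.1, p.2 ++ [(i, j)]) else p) p
    = (p.1 ++ (K.map (fun j => (i, j))).filter (fun c => cell lab c.1 c.2 == 0),
       p.2 ++ (K.map (fun j => (i, j))).filter (fun c => cell lab c.1 c.2 == 2)) := by
  intro K
  induction K with
  | nil => intro p; simp
  | cons j K ih =>
    intro p
    by_cases h0 : cell lab i j = 0
    · simp [h0, ih, List.filter_cons]
    · by_cases h2 : cell lab i j = 2
      · simp [h0, h2, ih, List.filter_cons]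
      · simp [h0, h2, ih, List.filter_cons]

theorem scanA_eq (n m : Int) (lab : List (List Int)) :
    scanA n m lab = ((cellsL n m).filter (fun c => cell lab c.1 c.2 == 0),
                     (cellsL n m).filter (fun c => cell lab c.1 c.2 == 2)) := by
  unfold scanA cellsL
  have outer : ∀ (L : List Int) (p : List (Int × Int) × List (Int × Int)),
      L.foldl (fun p i => (PySem.List.pyRange 0 m 1).foldl (fun p j =>
        if cell lab i j = 0 then (p.1 ++ [(i, j)], p.2)
        else if cell lab i j = 2 then (p.1, p.2 ++ [(i, j)]) else p) p) p
      = (p.1 ++ (L.flatMap (fun i => (PySem.List.pyRange 0 m 1).map (fun j => (i, j)))).filter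
            (fun c => cell lab c.1 c.2 == 0),
         p.2 ++ (L.flatMap (fun i => (PySem.List.pyRange 0 m 1).map (fun j => (i, j)))).filter
            (fun c => cell lab c.1 c.2 == 2)) := by
    intro L
    induction L with
    | nil => intro p; simp
    | cons i L ih =>
      intro p
      rw [List.foldl_cons, scan_inner, ih]
      simp [List.flatMap_cons, List.filter_append, List.append_assoc]
  simpa using outer (PySem.List.pyRange 0 n 1) ([], [])

theorem count_inner (g : List (List Int)) (i : Int) :
    ∀ (K : List Int) (acc : Int),
    K.foldl (fun acc j => if cell g i j = 0 then acc + 1 else acc) acc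
      = acc + (((K.map (fun j => (i, j))).filter (fun c => cell g c.1 c.2 == 0)).length : Int) := by
  intro K
  induction K with
  | nil => intro acc; simp
  | cons j K ih =>
    intro acc
    by_cases h0 : cell g i j = 0
    · simp only [List.foldl_cons, h0, if_pos, ih, List.map_cons, List.filter_cons]
      simp [h0]
      push_cast
      ring
    · simp only [List.foldl_cons, h0, if_neg, ih, List.map_cons, List.filter_cons]
      simp [h0]

theorem safeAreaA_eq (g : List (List Int)) (n m : Int) :
    safeAreaA g n m = (((cellsL n m).filter (fun c => cell g c.1 c.2 == 0)).length : Int) := by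
  unfold safeAreaA cellsL
  have outer : ∀ (L : List Int) (acc : Int),
      L.foldl (fun acc i => (PySem.List.pyRange 0 m 1).foldl
        (fun acc j => if cell g i j = 0 then acc + 1 else acc) acc) acc
      = acc + (((L.flatMap (fun i => (PySem.List.pyRange 0 m 1).map (fun j => (i, j)))).filter
          (fun c => cell g c.1 c.2 == 0)).length : Int) := by
    intro L
    induction L with
    | nil => intro acc; simp
    | cons i L ih =>
      intro acc
      rw [List.foldl_cons, count_inner, ih]
      simp [List.flatMap_cons, List.filter_append, List.length_append]
      push_cast
      ring
  simpa using outer (PySem.List.pyRange 0 n 1) 0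

theorem combos_subset {α : Type} {k : Nat} {l t : List α} (h : t ∈ combos k l) :
    ∀ x ∈ t, x ∈ l := by
  induction l generalizing k t with
  | nil =>
    cases k with
    | zero => simp [combos] at h; subst h; simp
    | succ k => simp [combos] at h
  | cons a l ih =>
    cases k with
    | zero => simp [combos] at h; subst h; simp
    | succ k =>
      simp only [combos, List.mem_append, List.mem_map] at h
      rcases h with ⟨t', ht', rfl⟩ | ht
      · intro x hx
        rcases List.mem_cons.mp hx with rfl | hx'
        · exact List.mem_cons_self
        · exact List.mem_cons_of_mem _ (ih ht' x hx')
      · intro x hx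
        exact List.mem_cons_of_mem _ (ih ht x hx)

theorem wall_fold {n m : Int} : ∀ (ws : List (Int × Int)) (g : List (List Int)),
    Shaped n m g → (∀ w ∈ ws, w ∈ cellsL n m) →
    Shaped n m (ws.foldl (fun g w => upd g w.1 w.2 1) g) ∧
    ∀ c ∈ cellsL n m, cell (ws.foldl (fun g w => upd g w.1 w.2 1) g) c.1 c.2 =
      if c ∈ ws then 1 else cell g c.1 c.2 := by
  intro ws
  induction ws with
  | nil =>
    intro g hSh _
    exact ⟨hSh, fun c _ => by simp⟩
  | cons w ws ih =>
    intro g hSh hws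
    obtain ⟨hw1, hw2, hw3, hw4⟩ := mem_cellsL.mp (hws w List.mem_cons_self)
    have hidx := shaped_idx hSh hw1 hw2 hw3 hw4
    have hrec := ih (upd g w.1 w.2 1) (shaped_upd hSh _ _ _)
      (fun v hv => hws v (List.mem_cons_of_mem _ hv))
    simp only [List.foldl_cons]
    refine ⟨hrec.1, fun c hc => ?_⟩
    obtain ⟨hc1, hc2, hc3, hc4⟩ := mem_cellsL.mp hc
    rw [hrec.2 c hc, cell_upd 1 hw1 hw3 hc1 hc3 hidx.1 hidx.2]
    by_cases hcw : c ∈ ws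
    · simp [hcw, List.mem_cons_of_mem]
    · rw [if_neg hcw]
      by_cases hcw2 : c = w
      · rw [if_pos ⟨by rw [hcw2], by rw [hcw2]⟩, if_pos (by simp [hcw2])]
      · rw [if_neg (fun hh => hcw2 (Prod.ext hh.1 hh.2)),
          if_neg (by simp [hcw2, hcw])]

-- B's seeding loop: after all virus cells have been processed, the grid is the closure
theorem seed_fold (n m : Int) (W : List (List Int)) (hW : Shaped n m W)
    (F : Int × Int → Bool) :
    ∀ (vs : List (Int × Int)), (∀ v ∈ vs, v ∈ cellsL n m ∧ cell W v.1 v.2 = 2) →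
    ∀ (g : List (List Int)) (S : Int × Int → Bool),
      Shaped n m g → InvO n m W g S → SOK n m W S → ClosedE n m g F →
      ∃ S' : Int × Int → Bool,
        (∀ c, S c = true → S' c = true) ∧
        (let r := vs.foldl (fun g v =>
            dirs.foldl (fun gg d => dfsB (zcount n m gg + 1) n m gg (v.1 + d.1) (v.2 + d.2)) g) g
         Shaped n m r ∧ InvO n m W r S' ∧ SOK n m W S' ∧ ClosedE n m r F ∧
         ∀ v ∈ vs, ∀ d ∈ dirs, (v.1 + d.1, v.2 + d.2) ∈ cellsL n m →
           cell W (v.1 + d.1) (v.2 + d.2) = 0 → S' (v.1 + d.1, v.2 + d.2) = true) := by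
  intro vs
  induction vs with
  | nil =>
    intro _ g S h1 h2 h3 h4
    exact ⟨S, fun c h => h, h1, h2, h3, h4, by simp⟩
  | cons v vs ih =>
    intro hvs g S h1 h2 h3 h4
    obtain ⟨hvC, hv2⟩ := hvs v List.mem_cons_self
    have hRv : ReachV n m W v := ReachV.seed v hvC hv2
    have inner : ∀ ds : List (Int × Int), (∀ d ∈ ds, d ∈ dirs) →
        ∀ (g' : List (List Int)) (S' : Int × Int → Bool),
        Shaped n m g' → InvO n m W g' S' → SOK n m W S' → ClosedE n m g' F →
        ∃ S'' : Int × Int → Bool,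
          (∀ c, S' c = true → S'' c = true) ∧
          (let r := ds.foldl (fun gg d => dfsB (zcount n m gg + 1) n m gg (v.1 + d.1) (v.2 + d.2)) g'
           Shaped n m r ∧ InvO n m W r S'' ∧ SOK n m W S'' ∧ ClosedE n m r F ∧
           ∀ d ∈ ds, (v.1 + d.1, v.2 + d.2) ∈ cellsL n m →
             cell W (v.1 + d.1) (v.2 + d.2) = 0 → S'' (v.1 + d.1, v.2 + d.2) = true) := by
      intro ds
      induction ds with
      | nil =>
        intro _ g' S' k1 k2 k3 k4
        exact ⟨S', fun c h => h, k1, k2, k3, k4, by simp⟩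
      | cons d ds ihd =>
        intro hds g' S' k1 k2 k3 k4
        have hd : d ∈ dirs := hds d List.mem_cons_self
        obtain ⟨S2, km, kSh, kI, kS, kC, _, kcl⟩ :=
          dfs_main n m W hW (zcount n m g' + 1) (v.1 + d.1) (v.2 + d.2) g' S' F k1 k2 k3 k4
            (fun hm' hW0 => ReachV.step v d hRv hd hm' hW0) (by omega)
        obtain ⟨S3, km3, krest⟩ := ihd (fun e he => hds e (List.mem_cons_of_mem _ he))
          (dfsB (zcount n m g' + 1) n m g' (v.1 + d.1) (v.2 + d.2)) S2 kSh kI kS kC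
        simp only at krest
        simp only [List.foldl_cons]
        refine ⟨S3, fun c hc => km3 c (km c hc), krest.1, krest.2.1, krest.2.2.1,
          krest.2.2.2.1, ?_⟩
        intro e he hm' hW0
        rcases List.mem_cons.mp he with rfl | he'
        · exact km3 _ (kcl hm' hW0)
        · exact krest.2.2.2.2 e he' hm' hW0
    obtain ⟨S2, hm2, hpack⟩ := inner dirs (fun d h => h) g S h1 h2 h3 h4
    simp only at hpack
    obtain ⟨p1, p2, p3, p4, p5⟩ := hpack
    obtain ⟨S3, hm3, hpack3⟩ := ih (fun u hu => hvs u (List.mem_cons_of_mem _ hu)) _ S2 p1 p2 p3 p4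
    simp only at hpack3
    refine ⟨S3, fun c hc => hm3 c (hm2 c hc), ?_⟩
    simp only [List.foldl_cons]
    refine ⟨hpack3.1, hpack3.2.1, hpack3.2.2.1, hpack3.2.2.2.1, ?_⟩
    intro u hu d hd hm' hW0
    rcases List.mem_cons.mp hu with rfl | hu'
    · exact hm3 _ (p5 d hd hm' hW0)
    · exact hpack3.2.2.2.2 u hu' d hd hm' hW0

-- per-combination equality of the two safe areas
theorem combo_eq (n m : Int) (lab : List (List Int)) (hSh : Shaped n m lab)
    (walls : List (Int × Int))
    (hw : ∀ w ∈ walls, w ∈ cellsL n m ∧ cell lab w.1 w.2 = 0)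
    (t : List (List Int)) (vs : List (Int × Int))
    (ht : t = walls.foldl (fun g w => upd g w.1 w.2 1) lab)
    (hvs : vs = (cellsL n m).filter (fun c => cell lab c.1 c.2 == 2)) :
    safeAreaA (spreadA (vs.length + zcount n m t) n m t vs) n m =
      (((cellsL n m).filter (fun c => cell
        (vs.foldl (fun g v => dirs.foldl
          (fun gg d => dfsB (zcount n m gg + 1) n m gg (v.1 + d.1) (v.2 + d.2)) g) t)
        c.1 c.2 == 0)).length : Int) := by
  obtain ⟨hWsh, hWc⟩ := wall_fold walls lab hSh (fun w hw' => (hw w hw').1)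
  rw [← ht] at hWsh hWc
  have hseed : ∀ c ∈ cellsL n m, (cell t c.1 c.2 = 2 ↔ cell lab c.1 c.2 = 2) := by
    intro c hc
    rw [hWc c hc]
    by_cases hcw : c ∈ walls
    · rw [if_pos hcw]
      have := (hw c hcw).2
      constructor
      · omega
      · omega
    · rw [if_neg hcw]
  have hvsP : ∀ v ∈ vs, v ∈ cellsL n m ∧ cell t v.1 v.2 = 2 := by
    intro v hv
    rw [hvs] at hv
    obtain ⟨hm', hb⟩ := List.mem_filter.mp hv
    exact ⟨hm', (hseed v hm').mpr (by simpa using hb)⟩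
  have hvsC : ∀ c ∈ cellsL n m, cell t c.1 c.2 = 2 → c ∈ vs := by
    intro c hc h2
    rw [hvs]
    exact List.mem_filter.mpr ⟨hc, by simp [(hseed c hc).mp h2]⟩
  -- A's BFS result is the reachability closure of the walled grid t
  have charA := bfs_main n m t hWsh (vs.length + zcount n m t) t vs (fun _ => false)
    hWsh (fun c _ => by simp) (fun c hSc => by simp at hSc)
    (fun v hv => ⟨(hvsP v hv).1, (hvsP v hv).2, ReachV.seed v (hvsP v hv).1 (hvsP v hv).2⟩)
    (fun c hc h2 hnotin _ _ _ _ => absurd (hvsC c hc h2) hnotin)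
    (le_refl _)
  -- B's DFS result is the same closure
  obtain ⟨S', _, hpackB⟩ := seed_fold n m t hWsh (fun c => cell lab c.1 c.2 == 2) vs hvsP
    t (fun _ => false) hWsh (fun c _ => by simp) (fun c hSc => by simp at hSc)
    (by
      intro c hc h2 hFc d hd hm'
      have hl2 : cell lab c.1 c.2 = 2 := (hseed c hc).mp h2
      simp [hl2] at hFc)
  simp only at hpackB
  obtain ⟨_, hIB, hSB, hCB, hclB⟩ := hpackB
  have charB := final_char hIB hSB hCB (by
    intro c hc hFc h2 d hd hm' hW0
    have hlab2 : cell lab c.1 c.2 = 2 := by simpa using hFc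
    have hcvs : c ∈ vs := hvsC c hc ((hseed c hc).mpr hlab2)
    exact hclB c hcvs d hd hm' hW0)
  -- pointwise equal grids give equal safe areas
  rw [safeAreaA_eq]
  congr 1
  apply congrArg
  apply List.filter_congr
  intro c hc
  by_cases hr : ReachV n m t c
  · rw [((charA c hc).1 hr), ((charB c hc).1 hr)]
  · rw [((charA c hc).2 hr), ((charB c hc).2 hr)]

theorem cellsL_nil {n m : Int} (h : n ≤ 0 ∨ m ≤ 0) : cellsL n m = [] := by
  rcases h with h | h
  · simp [cellsL, PySem.List.pyRange_one_eq_nil (by omega : n ≤ 0)]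
  · simp [cellsL, PySem.List.pyRange_one_eq_nil (by omega : m ≤ 0)]

theorem max_eq_ite (a b : Int) : max a b = if a < b then b else a := by
  rcases lt_or_ge a b with h | h
  · rw [if_pos h, max_eq_right h.le]
  · rw [if_neg (not_lt.mpr h), max_eq_left h]

-- ===== VERDICT (by name: the statement is the Claim_ definition above) =====
theorem solve_spec : Claim_equal_solve := by
  intro n m lab hDom hPre
  show solve n m lab = solve_alt n m lab
  unfold solve solve_alt
  simp only [scanA_eq, List.map_id']
  by_cases hnm : 0 < n ∧ 0 < m
  · obtain ⟨hn, hm'⟩ := hnm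
    obtain ⟨hlen, hrows⟩ := hPre hn hm'
    have hShape : Shaped n m lab := by
      refine ⟨hlen, fun i hi => ?_⟩
      have hilen : i < lab.length := by omega
      have hmem : lab[i] ∈ lab.take n.toNat := by
        have hlt : i < (lab.take n.toNat).length := by simp; omega
        have he : (lab.take n.toNat)[i]'hlt = lab[i] := List.getElem_take
        exact he ▸ List.getElem_mem hlt
      have := hrows _ hmem
      rw [List.getD_eq_getElem?_getD, List.getElem?_eq_getElem hilen]
      simpa using this
    apply PySem.List.foldl_congr_mem
    intro best walls hwalls
    have hw : ∀ w ∈ walls, w ∈ cellsL n m ∧ cell lab w.1 w.2 = 0 := by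
      intro w hwin
      have := combos_subset hwalls w hwin
      obtain ⟨hm1, hb⟩ := List.mem_filter.mp this
      exact ⟨hm1, by simpa using hb⟩
    rw [combo_eq n m lab hShape walls hw _ _ rfl rfl, max_eq_ite]
  · have hcells : cellsL n m = [] := cellsL_nil (by omega)
    rw [hcells]
    rfl
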